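-- pv_equiv track=rewrite | github.com/MaxiSlibar/the-narrow-corridor | src/analysis/stagnation_wavelet.py | analyze_stagnation_phases
-- ===== SOURCE A (Python) =====
-- def analyze_stagnation_phases(signal, min_run_length=50):
--     """
--     Analysiert laengere Stagnations- und Aktivitaets-Phasen.
--
--     Returns:
--         stagnation_runs: Liste von (start, length) fuer Stagnationsphasen
--         activity_runs: Liste von (start, length) fuer Aktivitaetsphasen
--     """
--     stagnation_runs = []
--     activity_runs = []
--
--     current_start = 0
--     current_type = signal[0]
--
--     for i in range(1, len(signal)):
--         if signal[i] != current_type: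
--             length = i - current_start
--             if length >= min_run_length:
--                 if current_type == 1:
--                     stagnation_runs.append((current_start, length))
--                 else:
--                     activity_runs.append((current_start, length))
--             current_start = i
--             current_type = signal[i]
--
--     # Letzter Run
--     length = len(signal) - current_start
--     if length >= min_run_length:
--         if current_type == 1:
--             stagnation_runs.append((current_start, length))
--         else:
--             activity_runs.append((current_start, length))
--
--     return stagnation_runs, activity_runs
-- ===== SOURCE B (Python) =====
-- def analyze_stagnation_phases(sig, min_run_length=50):
--     """Boundary-based version: find change points by pairwise comparison of
--     adjacent elements, then classify each segment between boundaries.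
--     (parameter renamed sig only because the harness forbids the bare name
--     of the stdlib 'signal' module; it is A's 'signal' argument)"""
--     n = len(sig)
--     starts = [(0, sig[0])] + [(i + 1, b)
--                               for i, (a, b) in enumerate(zip(sig, sig[1:]))
--                               if a != b]
--     ends = [s for s, _ in starts[1:]] + [n]
--     stagnation_runs, activity_runs = [], []
--     for (s, v), e in zip(starts, ends):
--         if e - s >= min_run_length:
--             (stagnation_runs if v == 1 else activity_runs).append((s, e - s))
--     return stagnation_runs, activity_runs
-- ===== Notes on version B (the rewrite author's own statement) =====
-- stated objective: alternative
-- what changed: B computes run boundaries by pairwise comparison of adjacent elements (enumerate over zip(signal, signal[1:])), pairs each boundary with the next one, and classifies the segments in between, instead of A's single index loop with a current-run state machine that appends at every change point.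
import Mathlib
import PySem

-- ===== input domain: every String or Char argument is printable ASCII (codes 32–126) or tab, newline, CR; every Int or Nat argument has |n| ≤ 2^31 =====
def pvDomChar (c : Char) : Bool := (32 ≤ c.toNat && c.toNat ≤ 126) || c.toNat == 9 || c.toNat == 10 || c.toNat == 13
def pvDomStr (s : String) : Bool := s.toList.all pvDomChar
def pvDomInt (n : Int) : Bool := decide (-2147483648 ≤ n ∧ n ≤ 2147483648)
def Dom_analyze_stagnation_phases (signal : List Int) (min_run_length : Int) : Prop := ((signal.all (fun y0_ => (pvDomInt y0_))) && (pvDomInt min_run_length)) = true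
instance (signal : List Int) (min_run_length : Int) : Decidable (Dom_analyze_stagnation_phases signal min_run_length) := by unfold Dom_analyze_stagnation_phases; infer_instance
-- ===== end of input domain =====

-- B finds the change points by pairwise comparison of adjacent elements (enumerate/zip) and then
-- classifies the segments between consecutive boundaries, instead of A's single index loop with a
-- current-run state machine; objective: alternative decomposition, same cost.

-- ===== PORT A =====
-- one loop step: i is the index, x = signal[i]; state (current_start, current_type, stagnation_runs, activity_runs)
def pvStepA (m : Int) (st : Int × Int × List (Int × Int) × List (Int × Int)) (i x : Int) :
    Int × Int × List (Int × Int) × List (Int × Int) :=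
  if x ≠ st.2.1 then
    let len := i - st.1
    let sa :=
      if len ≥ m then
        (if st.2.1 = 1 then (st.2.2.1 ++ [(st.1, len)], st.2.2.2)
         else (st.2.2.1, st.2.2.2 ++ [(st.1, len)]))
      else (st.2.2.1, st.2.2.2)
    (i, x, sa)
  else st

-- pyGetD is exact here: Pre_ gives a nonempty signal so the first read is in range, and the loop index i ∈ range(1, len) is always in range
def analyze_stagnation_phases (signal : List Int) (min_run_length : Int) : (List (Int × Int)) × (List (Int × Int)) :=
  let st0 : Int × Int × List (Int × Int) × List (Int × Int) :=
    (0, PySem.List.pyGetD signal 0 0, [], [])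
  let st := (PySem.List.pyRange 1 (signal.length : Int) 1).foldl
      (fun st i => pvStepA min_run_length st i (PySem.List.pyGetD signal i 0)) st0
  -- letzter Run
  let len := (signal.length : Int) - st.1
  if len ≥ min_run_length then
    (if st.2.1 = 1 then (st.2.2.1 ++ [(st.1, len)], st.2.2.2)
     else (st.2.2.1, st.2.2.2 ++ [(st.1, len)]))
  else (st.2.2.1, st.2.2.2)

-- ===== PORT B =====
-- starts: the head boundary plus one boundary per adjacent unequal pair (the comprehension over enumerate/zip)
-- ends   = [s for s,_ in starts[1:]] + [n];  then one classification loop over zip(starts, ends)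
def analyze_stagnation_phases_alt (signal : List Int) (min_run_length : Int) : (List (Int × Int)) × (List (Int × Int)) :=
  let n : Int := signal.length
  let starts : List (Int × Int) :=
    (0, PySem.List.pyGetD signal 0 0) ::
      (PySem.List.enumerate (signal.zip (PySem.List.slice signal (some 1) none)) 0).filterMap
        (fun p => if p.2.1 ≠ p.2.2 then some (p.1 + 1, p.2.2) else none)
  let ends : List Int := (starts.drop 1).map Prod.fst ++ [n]
  (starts.zip ends).foldl
    (fun acc p =>
      if p.2 - p.1.1 ≥ min_run_length then
        (if p.1.2 = 1 then (acc.1 ++ [(p.1.1, p.2 - p.1.1)], acc.2)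
         else (acc.1, acc.2 ++ [(p.1.1, p.2 - p.1.1)]))
      else acc) ([], [])

-- ===== PRECONDITION & SPEC =====
-- A reads the first element and raises IndexError on the empty list (as does B); Pre_ excludes exactly that input.
def Pre_analyze_stagnation_phases (signal : List Int) (min_run_length : Int) : Prop := signal ≠ []
instance (signal : List Int) (min_run_length : Int) : Decidable (Pre_analyze_stagnation_phases signal min_run_length) := by unfold Pre_analyze_stagnation_phases; infer_instance
def pvWitness_analyze_stagnation_phases : List Int × Int := ([1, 1, 0], 2)

def Spec_analyze_stagnation_phases (signal : List Int) (min_run_length : Int) (out : (List (Int × Int)) × (List (Int × Int))) : Prop := out = analyze_stagnation_phases_alt signal min_run_length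
instance (signal : List Int) (min_run_length : Int) (out : (List (Int × Int)) × (List (Int × Int))) : Decidable (Spec_analyze_stagnation_phases signal min_run_length out) := by unfold Spec_analyze_stagnation_phases; infer_instance

-- ===== CLAIM (what is proved, stated in full; the proofs are below) =====
def Claim_equal_analyze_stagnation_phases : Prop := ∀ (signal : List Int) (min_run_length : Int), Dom_analyze_stagnation_phases signal min_run_length → Pre_analyze_stagnation_phases signal min_run_length → Spec_analyze_stagnation_phases signal min_run_length (analyze_stagnation_phases signal min_run_length)

-- ===== LEMMAS AND PROOFS =====

-- A's loop, rephrased as structural recursion over the tail with the index carried along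
def pvLoopA (m : Int) : List Int → Int → (Int × Int × List (Int × Int) × List (Int × Int)) → (Int × Int × List (Int × Int) × List (Int × Int))
  | [], _, st => st
  | y :: ys, k, st => pvLoopA m ys (k + 1) (pvStepA m st k y)

-- A's trailing "letzter Run" block
def pvFinish (m n : Int) (st : Int × Int × List (Int × Int) × List (Int × Int)) :
    (List (Int × Int)) × (List (Int × Int)) :=
  let len := n - st.1
  if len ≥ m then
    (if st.2.1 = 1 then (st.2.2.1 ++ [(st.1, len)], st.2.2.2)
     else (st.2.2.1, st.2.2.2 ++ [(st.1, len)]))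
  else (st.2.2.1, st.2.2.2)

-- classification of a run list of (value, start, length) triples, accumulator style
def pvProcess (m : Int) : List (Int × Int × Int) → List (Int × Int) → List (Int × Int) → (List (Int × Int)) × (List (Int × Int))
  | [], stag, act => (stag, act)
  | (v, s, l) :: rest, stag, act =>
    if l ≥ m then
      (if v = 1 then pvProcess m rest (stag ++ [(s, l)]) act
       else pvProcess m rest stag (act ++ [(s, l)]))
    else pvProcess m rest stag act

-- the maximal runs of a list, as (value, start, length), fueled recursion (proof-side bridge)
def pvRunsB (fuel : Nat) (xs : List Int) (i : Int) : List (Int × Int × Int) :=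
  match fuel, xs with
  | _, [] => []
  | 0, _ :: _ => []   -- unreachable for fuel ≥ length
  | fuel + 1, x :: rest =>
    let t := rest.takeWhile (fun y => y == x)
    let len : Int := 1 + t.length
    (x, i, len) :: pvRunsB fuel (rest.dropWhile (fun y => y == x)) (i + len)

lemma foldl_pyRange_eq_pvLoopA (m : Int) (signal : List Int) :
    ∀ (ys : List Int) (k : Nat) (st : Int × Int × List (Int × Int) × List (Int × Int)),
      signal.drop k = ys →
      (PySem.List.pyRange (k : Int) (signal.length : Int) 1).foldl
          (fun st i => pvStepA m st i (PySem.List.pyGetD signal i 0)) st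
        = pvLoopA m ys (k : Int) st := by
  intro ys
  induction ys with
  | nil =>
    intro k st h
    have hk : signal.length ≤ k := List.drop_eq_nil_iff.mp h
    rw [PySem.List.pyRange_one_eq_nil (by exact_mod_cast hk)]
    rfl
  | cons y ys ih =>
    intro k st h
    have hk : k < signal.length := by
      rcases Nat.lt_or_ge k signal.length with hlt | hge
      · exact hlt
      · rw [List.drop_eq_nil_of_le hge] at h
        exact absurd h.symm (List.cons_ne_nil y ys)
    have hsome : signal[k]? = some y := by
      rw [← List.head?_drop, h]; rfl
    have hget : PySem.List.pyGetD signal (k : Int) 0 = y := by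
      simp [List.getD_eq_getElem?_getD, hsome]
    have hdrop : signal.drop (k + 1) = ys := by
      rw [← List.tail_drop, h]; rfl
    rw [PySem.List.pyRange_one_cons (by exact_mod_cast hk)]
    simp only [List.foldl_cons, hget]
    rw [pvLoopA]
    have hc1 : ((k : Int) + 1) = ((k + 1 : Nat) : Int) := by push_cast; ring
    rw [hc1]
    exact ih (k + 1) _ hdrop

lemma pvTakeWhile_rep (ct y : Int) (ys : List Int) (hy : y ≠ ct) :
    ∀ c : Nat, (List.replicate c ct ++ y :: ys).takeWhile (fun z => z == ct) = List.replicate c ct := by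
  intro c
  induction c with
  | zero => simp [hy]
  | succ n ihn => simpa [List.replicate_succ, List.takeWhile_cons] using ihn

lemma pvDropWhile_rep (ct y : Int) (ys : List Int) (hy : y ≠ ct) :
    ∀ c : Nat, (List.replicate c ct ++ y :: ys).dropWhile (fun z => z == ct) = y :: ys := by
  intro c
  induction c with
  | zero => simp [hy]
  | succ n ihn => simpa [List.replicate_succ, List.dropWhile_cons] using ihn

lemma pvRunsB_replicate (ct : Int) (c : Nat) (hc : 1 ≤ c) (i : Int) (fuel : Nat) (hf : 1 ≤ fuel) :
    pvRunsB fuel (List.replicate c ct) i = [(ct, i, (c : Int))] := by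
  obtain ⟨c', rfl⟩ : ∃ c', c = c' + 1 := ⟨c - 1, by omega⟩
  obtain ⟨f, rfl⟩ : ∃ f, fuel = f + 1 := ⟨fuel - 1, by omega⟩
  rw [List.replicate_succ, pvRunsB]
  simp [pvRunsB]
  ring

lemma pvRunsB_replicate_append (ct : Int) (c : Nat) (hc : 1 ≤ c) (i : Int)
    (y : Int) (ys : List Int) (hy : y ≠ ct) (f : Nat) :
    pvRunsB (f + 1) (List.replicate c ct ++ y :: ys) i
      = (ct, i, (c : Int)) :: pvRunsB f (y :: ys) (i + c) := by
  obtain ⟨c', rfl⟩ : ∃ c', c = c' + 1 := ⟨c - 1, by omega⟩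
  rw [List.replicate_succ, List.cons_append, pvRunsB]
  simp only [pvTakeWhile_rep ct y ys hy c', pvDropWhile_rep ct y ys hy c', List.length_replicate]
  have h1 : (1 : Int) + (c' : Int) = ((c' + 1 : Nat) : Int) := by push_cast; ring
  rw [h1]

-- fuel irrelevance: any fuel ≥ the list length gives the same run list
lemma pvRunsB_fuel_irrel :
    ∀ (n : Nat) (xs : List Int), xs.length ≤ n →
      ∀ (fuel fuel' : Nat) (i : Int), xs.length ≤ fuel → xs.length ≤ fuel' →
        pvRunsB fuel xs i = pvRunsB fuel' xs i := by
  intro n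
  induction n with
  | zero =>
    intro xs hn fuel fuel' i _ _
    have hx : xs = [] := List.length_eq_zero_iff.mp (by omega)
    subst hx
    cases fuel <;> cases fuel' <;> rfl
  | succ n ih =>
    intro xs hn fuel fuel' i hf hf'
    cases xs with
    | nil => cases fuel <;> cases fuel' <;> rfl
    | cons x rest =>
      obtain ⟨f, rfl⟩ : ∃ f, fuel = f + 1 := ⟨fuel - 1, by simp at hf; omega⟩
      obtain ⟨f', rfl⟩ : ∃ f', fuel' = f' + 1 := ⟨fuel' - 1, by simp at hf'; omega⟩
      rw [pvRunsB, pvRunsB]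
      have hlen : (rest.dropWhile (fun y => y == x)).length ≤ rest.length :=
        List.length_dropWhile_le _ _
      have hrest : rest.length ≤ n := by simp at hn; omega
      congr 1
      exact ih _ (by omega) f f' _ (by simp at hf; omega) (by simp at hf'; omega)

-- the A-side invariant: running A's state machine over ys after having read c copies of ct
-- (the pending run, started at cs) classifies exactly the runs of (ct^c ++ ys)
lemma pvLoopA_eq_pvProcess (m : Int) :
    ∀ (ys : List Int) (c : Nat) (cs ct : Int) (stag act : List (Int × Int)), 1 ≤ c →
      pvFinish m (cs + c + ys.length) (pvLoopA m ys (cs + c) (cs, ct, stag, act))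
        = pvProcess m (pvRunsB (c + ys.length) (List.replicate c ct ++ ys) cs) stag act := by
  intro ys
  induction ys with
  | nil =>
    intro c cs ct stag act hc
    rw [List.append_nil, pvRunsB_replicate ct c hc cs _ (by omega)]
    simp only [List.length_nil, Nat.cast_zero, add_zero, pvLoopA, pvFinish, pvProcess]
    have h1 : cs + (c : Int) - cs = (c : Int) := by ring
    rw [h1]
  | cons y ys ih =>
    intro c cs ct stag act hc
    by_cases hy : y = ct
    · subst hy
      have hrep : List.replicate c y ++ y :: ys = List.replicate (c + 1) y ++ ys := by
        rw [List.replicate_succ']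
        simp
      have hfuel : c + (y :: ys).length = (c + 1) + ys.length := by simp; omega
      rw [hrep, hfuel, ← ih (c + 1) cs y stag act (by omega)]
      rw [pvLoopA, pvStepA]
      rw [if_neg (by simp)]
      have e1 : cs + ((c : Int)) + ((y :: ys).length : Int) = cs + ((c + 1 : Nat) : Int) + (ys.length : Int) := by
        simp [List.length_cons]; ring
      have e2 : cs + ((c : Int)) + 1 = cs + ((c + 1 : Nat) : Int) := by push_cast; ring
      rw [e1, e2]
    · have h1 : cs + (c : Int) - cs = (c : Int) := by ring
      have hstep : pvStepA m (cs, ct, stag, act) (cs + (c : Int)) y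
          = (cs + (c : Int), y, (pvProcess m [(ct, cs, (c : Int))] stag act)) := by
        simp only [pvStepA, pvProcess]
        simp [hy, h1]
      have hfuel : c + (y :: ys).length = (c + ys.length) + 1 := by simp; omega
      rw [hfuel, pvRunsB_replicate_append ct c hc cs y ys hy]
      have hrhs : pvProcess m ((ct, cs, (c : Int)) :: pvRunsB (c + ys.length) (y :: ys) (cs + c)) stag act
          = pvProcess m (pvRunsB (c + ys.length) (y :: ys) (cs + c)) (pvProcess m [(ct, cs, (c : Int))] stag act).1 (pvProcess m [(ct, cs, (c : Int))] stag act).2 := by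
        simp only [pvProcess]
        split_ifs <;> rfl
      rw [hrhs,
        pvRunsB_fuel_irrel (c + ys.length) (y :: ys) (by simp; omega) _ (1 + ys.length) _ (by simp; omega) (by simp)]
      have := ih 1 (cs + (c : Int)) y (pvProcess m [(ct, cs, (c : Int))] stag act).1 (pvProcess m [(ct, cs, (c : Int))] stag act).2 (le_refl 1)
      simp only [List.replicate_one, List.singleton_append, Nat.cast_one] at this
      rw [← this]
      rw [pvLoopA, hstep]
      have e1 : cs + ((c : Int)) + ((y :: ys).length : Int) = cs + (c : Int) + 1 + (ys.length : Int) := by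
        simp [List.length_cons]; ring
      rw [e1]

-- ===== B-side lemmas =====

-- B's change-point list (the inner comprehension), start index abstracted
def pvChg (xs : List Int) (s : Int) : List (Int × Int) :=
  (PySem.List.enumerate (xs.zip xs.tail) s).filterMap
    (fun p => if p.2.1 ≠ p.2.2 then some (p.1 + 1, p.2.2) else none)

-- B's classification loop, rephrased as structural recursion over the start list
def pvSegs (m n : Int) : List (Int × Int) → (List (Int × Int) × List (Int × Int)) → (List (Int × Int)) × (List (Int × Int))
  | [], acc => acc
  | (s, v) :: rest, acc =>
    let e := ((rest.head?).map Prod.fst).getD n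
    pvSegs m n rest
      (if e - s ≥ m then
        (if v = 1 then (acc.1 ++ [(s, e - s)], acc.2) else (acc.1, acc.2 ++ [(s, e - s)]))
       else acc)

lemma foldB_eq_pvSegs (m n : Int) :
    ∀ (starts : List (Int × Int)) (acc : List (Int × Int) × List (Int × Int)),
      (starts.zip ((starts.drop 1).map Prod.fst ++ [n])).foldl
        (fun acc p =>
          if p.2 - p.1.1 ≥ m then
            (if p.1.2 = 1 then (acc.1 ++ [(p.1.1, p.2 - p.1.1)], acc.2)
             else (acc.1, acc.2 ++ [(p.1.1, p.2 - p.1.1)]))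
          else acc) acc
      = pvSegs m n starts acc := by
  intro starts
  induction starts with
  | nil => intro acc; rfl
  | cons p rest ih =>
    intro acc
    obtain ⟨s, v⟩ := p
    cases rest with
    | nil => simp [pvSegs]
    | cons q tq =>
      simp only [List.drop_succ_cons, List.drop_zero, List.map_cons, List.cons_append,
        List.zip_cons_cons, List.foldl_cons, pvSegs, List.head?_cons, Option.map_some,
        Option.getD_some]
      exact ih _


lemma pvSegs_cons (m n s v : Int) (rest : List (Int × Int)) (acc : List (Int × Int) × List (Int × Int)) :
    pvSegs m n ((s, v) :: rest) acc
      = pvSegs m n rest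
          (if ((rest.head?).map Prod.fst).getD n - s ≥ m then
            (if v = 1 then (acc.1 ++ [(s, ((rest.head?).map Prod.fst).getD n - s)], acc.2)
             else (acc.1, acc.2 ++ [(s, ((rest.head?).map Prod.fst).getD n - s)]))
           else acc) := rfl

lemma pvProcess_cons (m v s l : Int) (rest : List (Int × Int × Int)) (stag act : List (Int × Int)) :
    pvProcess m ((v, s, l) :: rest) stag act
      = if l ≥ m then
          (if v = 1 then pvProcess m rest (stag ++ [(s, l)]) act
           else pvProcess m rest stag (act ++ [(s, l)]))
        else pvProcess m rest stag act := rfl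

lemma pvFilterMap_enum_rep (x : Int) :
    ∀ (c : Nat) (s : Int),
      (PySem.List.enumerate (List.replicate c (x, x)) s).filterMap
        (fun p : Int × Int × Int => if p.2.1 ≠ p.2.2 then some (p.1 + 1, p.2.2) else none) = [] := by
  intro c
  induction c with
  | zero => intro s; simp [PySem.List.enumerate_nil]
  | succ k ih =>
    intro s
    rw [List.replicate_succ, PySem.List.enumerate_cons, List.filterMap_cons_none (by simp)]
    exact ih (s + 1)

lemma pvAdjRep (x y : Int) (ys : List Int) :
    ∀ c : Nat, (List.replicate (c + 1) x ++ y :: ys).zip (List.replicate c x ++ y :: ys)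
      = List.replicate c (x, x) ++ (x, y) :: (y :: ys).zip ys := by
  intro c
  induction c with
  | zero => simp
  | succ k ih =>
    rw [List.replicate_succ (n := k + 1), List.replicate_succ (n := k)]
    simpa [List.replicate_succ] using ih

lemma pvTail_rep_append (x : Int) (c : Nat) (r : List Int) :
    (List.replicate (c + 1) x ++ r).tail = List.replicate c x ++ r := by
  rw [List.replicate_succ]; rfl

-- pvChg of a whole run followed by a different element: one change point, then the rest shifted
lemma pvChg_rep_append (x y : Int) (ys : List Int) (hy : y ≠ x) (c : Nat) (s : Int) :
    pvChg (List.replicate (c + 1) x ++ y :: ys) s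
      = (s + (c + 1 : Nat), y) :: pvChg (y :: ys) (s + (c + 1 : Nat)) := by
  unfold pvChg
  rw [pvTail_rep_append, pvAdjRep, PySem.List.enumerate_append, List.filterMap_append,
    pvFilterMap_enum_rep, List.nil_append, PySem.List.enumerate_cons, List.filterMap_cons]
  have hxy : x ≠ y := fun h => hy h.symm
  simp only [List.length_replicate, if_pos (by simpa using hxy)]
  have e1 : s + (c : Int) + 1 = s + ((c + 1 : Nat) : Int) := by push_cast; ring
  have e2 : (y :: ys).tail = ys := rfl
  rw [e2, e1]

lemma pvZipRep (x : Int) :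
    ∀ k : Nat, (x :: List.replicate k x).zip (List.replicate k x) = List.replicate k (x, x) := by
  intro k
  induction k with
  | zero => rfl
  | succ j ih => simp [List.replicate_succ, List.zip_cons_cons, ih]

lemma pvChg_rep (x : Int) (c : Nat) (s : Int) :
    pvChg (List.replicate c x) s = [] := by
  unfold pvChg
  cases c with
  | zero => simp [PySem.List.enumerate_nil]
  | succ k =>
    have ht : (List.replicate (k + 1) x).tail = List.replicate k x := by
      simp [List.replicate_succ]
    have hz : (List.replicate (k + 1) x).zip (List.replicate k x) = List.replicate k (x, x) := by
      rw [List.replicate_succ]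
      exact pvZipRep x k
    rw [ht, hz, pvFilterMap_enum_rep]

-- leading-run decomposition of a list
lemma pvDecomp (x : Int) :
    ∀ t : List Int, ∃ (k : Nat) (r : List Int),
      t = List.replicate k x ++ r ∧ t.length = k + r.length ∧
      (r = [] ∨ ∃ (y : Int) (ys : List Int), r = y :: ys ∧ y ≠ x) := by
  intro t
  induction t with
  | nil => exact ⟨0, [], by simp, by simp, Or.inl rfl⟩
  | cons z zs ih =>
    by_cases hz : z = x
    · obtain ⟨k, r, h1, h2, h3⟩ := ih
      exact ⟨k + 1, r, by rw [List.replicate_succ]; simp [hz, h1], by simp [h2]; omega, h3⟩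
    · exact ⟨0, z :: zs, by simp, by simp, Or.inr ⟨z, zs, rfl, hz⟩⟩

-- the B-side invariant: classifying the segments between boundaries = classifying the run list
lemma pvSegs_eq_pvProcess (m : Int) :
    ∀ (n : Nat) (t : List Int), t.length ≤ n → ∀ (x : Int) (off : Int) (stag act : List (Int × Int)),
      pvSegs m (off + (1 + (t.length : Int))) ((off, x) :: pvChg (x :: t) off) (stag, act)
        = pvProcess m (pvRunsB (1 + t.length) (x :: t) off) stag act := by
  intro n
  induction n with
  | zero =>
    intro t ht x off stag act
    have : t = [] := List.length_eq_zero_iff.mp (by omega)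
    subst this
    simp only [List.length_nil, Nat.cast_zero, add_zero]
    rw [show (x :: ([] : List Int)) = List.replicate 1 x by rfl, pvChg_rep,
      pvRunsB_replicate x 1 (by omega) off 1 (by omega)]
    rw [pvSegs_cons, pvProcess_cons]
    simp only [List.head?_nil, Option.map_none, Option.getD_none, Nat.cast_one]
    rw [show off + 1 - off = (1 : Int) by ring]
    split_ifs <;> simp [pvSegs, pvProcess]
  | succ n ih =>
    intro t ht x off stag act
    obtain ⟨k, r, hdec, hlen, hr⟩ := pvDecomp x t
    have hxt : x :: t = List.replicate (k + 1) x ++ r := by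
      rw [List.replicate_succ]; simp [hdec]
    rcases hr with rfl | ⟨y, ys, rfl, hy⟩
    · -- single run
      rw [List.append_nil] at hxt
      rw [hxt, pvChg_rep, pvRunsB_replicate x (k + 1) (by omega) off _ (by omega),
        pvSegs_cons, pvProcess_cons]
      simp only [List.head?_nil, Option.map_none, Option.getD_none]
      have e : off + (1 + (t.length : Int)) - off = ((k + 1 : Nat) : Int) := by
        simp at hlen; push_cast [hlen]; ring
      rw [e]
      split_ifs <;> rfl
    · -- first run then the rest
      rw [hxt, pvChg_rep_append x y ys hy k off]
      have hys : ys.length ≤ n := by simp at hlen; omega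
      have hfuel1 : 1 + t.length = (t.length) + 1 := by omega
      have hfuel2 : pvRunsB (1 + t.length) (List.replicate (k + 1) x ++ y :: ys) off
          = (x, off, ((k + 1 : Nat) : Int)) :: pvRunsB t.length (y :: ys) (off + ((k+1 : Nat) : Int)) := by
        rw [hfuel1]
        exact pvRunsB_replicate_append x (k + 1) (by omega) off y ys hy t.length
      rw [hfuel2,
        pvRunsB_fuel_irrel t.length (y :: ys) (by simp at hlen ⊢; omega) t.length (1 + ys.length) _
          (by simp at hlen ⊢; omega) (by simp)]
      -- unfold one step of pvSegs and one step of pvProcess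
      rw [pvSegs_cons, pvProcess_cons]
      simp only [List.head?_cons, Option.map_some, Option.getD_some]
      have e0 : off + ((k + 1 : Nat) : Int) - off = ((k + 1 : Nat) : Int) := by ring
      rw [e0]
      have etot : off + (1 + (t.length : Int)) = (off + ((k + 1 : Nat) : Int)) + (1 + (ys.length : Int)) := by
        simp at hlen; push_cast [hlen]; ring
      rw [etot]
      split_ifs <;> exact ih ys hys y _ _ _

-- ===== VERDICT (by name: the statement is the Claim_ definition above) =====
theorem analyze_stagnation_phases_spec : Claim_equal_analyze_stagnation_phases := by
  intro signal m _ hpre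
  unfold Spec_analyze_stagnation_phases
  obtain ⟨x, rest, rfl⟩ : ∃ x rest, signal = x :: rest := by
    cases signal with
    | nil => exact absurd rfl hpre
    | cons a l => exact ⟨a, l, rfl⟩
  -- A side
  have hbr := foldl_pyRange_eq_pvLoopA m (x :: rest) rest 1
      (0, PySem.List.pyGetD (x :: rest) 0 0, [], []) (by simp)
  rw [Nat.cast_one] at hbr
  have hA : analyze_stagnation_phases (x :: rest) m
      = pvFinish m (((x :: rest).length : Int)) (pvLoopA m rest 1 (0, x, [], [])) := by
    simp only [analyze_stagnation_phases, pvFinish]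
    rw [hbr]
    simp [PySem.List.pyGetD_zero_cons]
  have hmain := pvLoopA_eq_pvProcess m rest 1 0 x [] [] (le_refl 1)
  simp only [Nat.cast_one, zero_add, List.replicate_one, List.singleton_append] at hmain
  have hlen : (((x :: rest).length : Nat) : Int) = 1 + (rest.length : Int) := by
    push_cast [List.length_cons]; ring
  have hfuel : 1 + rest.length = (x :: rest).length := by simp; omega
  rw [hA, hlen, hmain, hfuel]
  -- B side
  have hB : analyze_stagnation_phases_alt (x :: rest) m
      = pvSegs m (0 + (1 + (rest.length : Int))) ((0, x) :: pvChg (x :: rest) 0) ([], []) := by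
    simp only [analyze_stagnation_phases_alt, PySem.List.slice_from_one,
      PySem.List.pyGetD_zero_cons]
    rw [foldB_eq_pvSegs]
    have : ((x :: rest).length : Int) = 0 + (1 + (rest.length : Int)) := by
      push_cast [List.length_cons]; ring
    rw [this]
    rfl
  rw [hB, pvSegs_eq_pvProcess m rest.length rest (le_refl _) x 0 [] [], hfuel]
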